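-- pv_equiv track=rewrite | github.com/paiml/depyler | examples/hard_numeric_patterns.py | to_binary_str_value
-- ===== SOURCE A (Python) =====
-- def to_binary_str_value(n: int) -> int:
--     """Return the decimal number formed by the binary digits of n.
--     E.g. 5 -> 101 (reading binary digits as decimal)."""
--     if n == 0:
--         return 0
--     val: int = n
--     if val < 0:
--         val = -val
--     result: int = 0
--     power: int = 1
--     while val > 0:
--         bit: int = val & 1
--         result = result + bit * power
--         power = power * 10
--         val = val >> 1
--     return result
-- ===== SOURCE B (Python) =====
-- def to_binary_str_value(n: int) -> int:
--     """Return the decimal number formed by the binary digits of n.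
--     Idiomatic closed form: format |n| as a binary string and reparse it in base 10."""
--     return int(format(abs(n), "b"))
-- ===== Notes on version B (the rewrite author's own statement) =====
-- stated objective: idiomatic
-- what changed: Replaced the manual bit-by-bit loop accumulating bit*power with a one-line string round-trip: format |n| as a binary string and reparse it as a decimal int.
import Mathlib
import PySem

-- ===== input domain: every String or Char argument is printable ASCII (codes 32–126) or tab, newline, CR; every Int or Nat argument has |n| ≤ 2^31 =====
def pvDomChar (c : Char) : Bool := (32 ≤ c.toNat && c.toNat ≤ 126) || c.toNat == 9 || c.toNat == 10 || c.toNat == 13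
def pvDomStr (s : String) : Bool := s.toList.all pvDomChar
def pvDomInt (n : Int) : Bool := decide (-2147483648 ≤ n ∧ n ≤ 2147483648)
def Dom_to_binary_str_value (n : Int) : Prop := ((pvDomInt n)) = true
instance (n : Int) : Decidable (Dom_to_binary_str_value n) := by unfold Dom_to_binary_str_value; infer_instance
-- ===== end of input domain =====

-- B replaces A's bit-by-bit accumulation loop with formatting |n| in binary and reparsing
-- the digit string in base 10 (objective: idiomatic).

-- ===== PORT A =====
-- the while-loop of A: state (val, result, power); 'val & 1' is PySem.Int.band, 'val >> 1' is '>>> 1'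
def pvLoopA (val result power : Int) : Int :=
  if val > 0 then
    pvLoopA (val >>> (1 : Nat)) (result + PySem.Int.band val 1 * power) (power * 10)
  else result
termination_by val.toNat
decreasing_by
  rw [Int.shiftRight_eq_div_pow]
  norm_num
  omega

def to_binary_str_value (n : Int) : Int :=
  if n == 0 then 0
  else
    let val : Int := n
    let val : Int := if val < 0 then -val else val
    pvLoopA val 0 1

-- ===== PORT B =====
-- format(m, "b"): the binary digits of m, most significant first (empty for m = 0)
def pvBinDigits (m : Nat) : List Nat :=
  if _h : m = 0 then [] else pvBinDigits (m / 2) ++ [m % 2]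
termination_by m
decreasing_by omega

-- int(s): parse the decimal digit string (format never yields an empty string: "0" for 0)
def to_binary_str_value_alt (n : Int) : Int :=
  let digits := if n.natAbs = 0 then [0] else pvBinDigits n.natAbs
  digits.foldl (fun (acc : Int) (d : Nat) => acc * 10 + (d : Int)) 0

-- ===== PRECONDITION & SPEC =====
def Spec_to_binary_str_value (n : Int) (out : Int) : Prop := out = to_binary_str_value_alt n
instance (n : Int) (out : Int) : Decidable (Spec_to_binary_str_value n out) := by unfold Spec_to_binary_str_value; infer_instance

-- ===== CLAIM (what is proved, stated in full; the proofs are below) =====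
def Claim_equal_to_binary_str_value : Prop := ∀ (n : Int), Dom_to_binary_str_value n → Spec_to_binary_str_value n (to_binary_str_value n)

-- ===== LEMMAS AND PROOFS =====

-- the common value: decimal reading of the binary digits of m (LSB recurrence)
def pvDec (m : Nat) : Int :=
  if h : m = 0 then 0 else pvDec (m / 2) * 10 + (m % 2 : Int)
termination_by m
decreasing_by omega

lemma pvLoopA_eq (m : Nat) : ∀ (result power : Int),
    pvLoopA (m : Int) result power = result + power * pvDec m := by
  induction m using Nat.strong_induction_on with
  | _ m ih =>
    intro result power
    by_cases h0 : m = 0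
    · subst h0
      rw [pvLoopA.eq_def, pvDec]
      simp
    · rw [pvLoopA.eq_def, pvDec]
      have hpos : (0 : Int) < (m : Int) := by exact_mod_cast Nat.pos_of_ne_zero h0
      rw [if_pos hpos, dif_neg h0]
      have hsh : ((m : Int) >>> (1 : Nat)) = ((m / 2 : Nat) : Int) := by
        rw [Int.shiftRight_eq_div_pow]
        norm_num
      have hband : PySem.Int.band (m : Int) 1 = ((m % 2 : Nat) : Int) := by
        rw [PySem.Int.band_one]
        exact_mod_cast PySem.Int.mod_natCast m 2
      rw [hsh, hband, ih (m / 2) (by omega)]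
      push_cast
      ring

lemma pvFold_binDigits (m : Nat) :
    (pvBinDigits m).foldl (fun (acc : Int) (d : Nat) => acc * 10 + (d : Int)) 0 = pvDec m := by
  induction m using Nat.strong_induction_on with
  | _ m ih =>
    by_cases h0 : m = 0
    · subst h0
      rw [pvBinDigits, pvDec]
      simp
    · rw [pvBinDigits, pvDec, dif_neg h0, dif_neg h0, List.foldl_append]
      simp [ih (m / 2) (by omega)]

-- ===== VERDICT (by name: the statement is the Claim_ definition above) =====
theorem to_binary_str_value_spec : Claim_equal_to_binary_str_value := by
  intro n _
  unfold Spec_to_binary_str_value to_binary_str_value to_binary_str_value_alt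
  by_cases h0 : n = 0
  · subst h0
    simp
  · have hn : (n == 0) = false := by simp [h0]
    have hna : n.natAbs ≠ 0 := by simpa using h0
    rw [hn]
    simp only [if_neg hna]
    rw [pvFold_binDigits]
    have habs : (if n < 0 then -n else n) = (n.natAbs : Int) := by omega
    simp only [habs, pvLoopA_eq n.natAbs 0 1]
    simp
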